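-- pv_equiv track=rewrite | github.com/krzysztof-turowski/programming-contests | google-code-jam/2022-qualification-round/3d_printing.py | solve
-- ===== SOURCE A (Python) =====
-- PRINTERS = 3
--
-- LIMIT = 10 ** 6
--
-- def solve(C):
--     def get_min(index):
--         return min(C[i][index] for i in range(PRINTERS))
--     bound = [get_min(index) for index, _ in enumerate(C[0])]
--     if sum(bound) < LIMIT:
--         return 'IMPOSSIBLE'
--     out = [0] * len(bound)
--     for i, b in enumerate(bound):
--         if sum(out) < LIMIT:
--             out[i] = min(LIMIT - sum(out), b)
--     return ' '.join(str(v) for v in out)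
-- ===== SOURCE B (Python) =====
-- PRINTERS = 3
--
-- LIMIT = 10 ** 6
--
-- def solve(C):
--     bound = [min(C[0][j], C[1][j], C[2][j]) for j in range(len(C[0]))]
--     total = sum(bound)
--     if total < LIMIT:
--         return 'IMPOSSIBLE'
--     out = bound[:]
--     excess = total - LIMIT
--     for i in range(len(out) - 1, -1, -1):
--         if excess <= 0:
--             break
--         take = min(out[i], excess)
--         out[i] -= take
--         excess -= take
--     return ' '.join(map(str, out))
-- ===== Notes on version B (the rewrite author's own statement) =====
-- stated objective: alternative
-- what changed: A fills colors front-to-back, recomputing sum(out) on every iteration until the limit is reached; B copies the per-color bounds and trims the excess ink off the back of the list right-to-left, with no re-summing.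
import Mathlib
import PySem

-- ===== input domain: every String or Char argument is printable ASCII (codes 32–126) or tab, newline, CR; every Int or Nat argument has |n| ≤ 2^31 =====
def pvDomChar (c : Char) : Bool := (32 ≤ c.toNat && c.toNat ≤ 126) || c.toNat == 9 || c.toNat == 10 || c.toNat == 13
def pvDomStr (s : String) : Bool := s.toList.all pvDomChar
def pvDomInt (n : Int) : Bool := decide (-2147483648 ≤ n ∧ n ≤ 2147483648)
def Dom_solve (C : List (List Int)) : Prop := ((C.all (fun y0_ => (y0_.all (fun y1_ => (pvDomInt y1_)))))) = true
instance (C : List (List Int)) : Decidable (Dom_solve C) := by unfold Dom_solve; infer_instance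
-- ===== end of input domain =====

-- B computes the same per-color bounds, then trims the excess ink off the back of the list
-- right-to-left, instead of A's front-fill that re-sums out on every step (objective: alternative).

-- ===== PORT A =====
def solve (C : List (List Int)) : String :=
  let c0 := (PySem.List.pyGet? C 0).getD []
  let getMin : Int → Int := fun index =>
    (PySem.List.min?
      ((PySem.List.pyRange 0 3 1).map
        (fun i => (PySem.List.pyGet? ((PySem.List.pyGet? C i).getD []) index).getD 0))
      (fun x => x)).getD 0
  let bound := (PySem.List.enumerate c0 0).map (fun p => getMin p.1)
  if bound.sum < 1000000 then "IMPOSSIBLE"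
  else
    let out := (PySem.List.enumerate bound 0).foldl
      (fun out p =>
        if out.sum < 1000000 then PySem.List.pySetD out p.1 (min (1000000 - out.sum) p.2)
        else out)
      (List.replicate bound.length 0)
    PySem.Str.join " " (out.map PySem.Int.toStr)

-- ===== PORT B =====
-- walk to the end of the list, then remove min(out[i], excess) from each element
-- right-to-left while excess > 0; returns (trimmed list, remaining excess)
def trimBack : List Int → Int → List Int × Int
  | [], e => ([], e)
  | x :: xs, e =>
    let p := trimBack xs e
    if p.2 ≤ 0 then (x :: p.1, p.2)
    else ((x - min x p.2) :: p.1, p.2 - min x p.2)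

def solve_alt (C : List (List Int)) : String :=
  let c0 := (PySem.List.pyGet? C 0).getD []
  let bound := (PySem.List.pyRange 0 c0.length 1).map (fun j =>
    min ((PySem.List.pyGet? c0 j).getD 0)
      (min ((PySem.List.pyGet? ((PySem.List.pyGet? C 1).getD []) j).getD 0)
           ((PySem.List.pyGet? ((PySem.List.pyGet? C 2).getD []) j).getD 0)))
  let total := bound.sum
  if total < 1000000 then "IMPOSSIBLE"
  else PySem.Str.join " " (((trimBack bound (total - 1000000)).1).map PySem.Int.toStr)

-- ===== PRECONDITION & SPEC =====
-- Pre_ excludes (a) inputs where A raises (fewer than 3 rows, or row 1/2 shorter than row 0: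
-- IndexError), and (b) malformed inputs with a negative per-color minimum that are still feasible
-- (column minima summing to ≥ 10^6): negative ink amounts are outside the problem's natural domain,
-- and A's fill there (leftover zeros / overshoot) is an accident of its in-place loop.
def Pre_solve (C : List (List Int)) : Prop :=
  3 ≤ C.length ∧
  (C.getD 0 []).length ≤ (C.getD 1 []).length ∧
  (C.getD 0 []).length ≤ (C.getD 2 []).length ∧
  ((List.zipWith min (C.getD 0 []) (List.zipWith min (C.getD 1 []) (C.getD 2 []))).sum < 1000000 ∨
   ∀ b ∈ List.zipWith min (C.getD 0 []) (List.zipWith min (C.getD 1 []) (C.getD 2 [])), 0 ≤ b)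

instance (C : List (List Int)) : Decidable (Pre_solve C) := by unfold Pre_solve; infer_instance

def pvWitness_solve : List (List Int) := [[600000, 500000], [700000, 400000], [600000, 600000]]

def Spec_solve (C : List (List Int)) (out : String) : Prop := out = solve_alt C
instance (C : List (List Int)) (out : String) : Decidable (Spec_solve C out) := by unfold Spec_solve; infer_instance

-- ===== CLAIM (what is proved, stated in full; the proofs are below) =====
def Claim_equal_solve : Prop := ∀ (C : List (List Int)), Dom_solve C → Pre_solve C → Spec_solve C (solve C)

-- ===== LEMMAS AND PROOFS =====

-- functional description of A's fill loop
def fillF : List Int → Int → List Int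
  | [], _ => []
  | b :: bs, s =>
    if s < 1000000 then min (1000000 - s) b :: fillF bs (s + min (1000000 - s) b)
    else 0 :: fillF bs s

theorem min3_eval (a b c : Int) :
    PySem.List.min? [a, b, c] (fun x => x) = some (min a (min b c)) := by
  simp only [PySem.List.min?, List.foldl]
  by_cases h1 : b < a <;> by_cases h2 : c < b <;> by_cases h3 : c < a <;>
    simp [h1, h2, h3, min_def] <;> omega

theorem set_append_cons (pre : List Int) (x v : Int) (rest : List Int) :
    (pre ++ x :: rest).set pre.length v = pre ++ v :: rest := by
  induction pre with
  | nil => simp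
  | cons a t ih => simp [ih]

theorem bound_eq (c0 c1 c2 : List Int) (rest : List (List Int))
    (h1 : c0.length ≤ c1.length) (h2 : c0.length ≤ c2.length) :
    (PySem.List.enumerate c0 0).map
        (fun p => (PySem.List.min?
          ((PySem.List.pyRange 0 3 1).map
            (fun i => (PySem.List.pyGet?
                ((PySem.List.pyGet? (c0 :: c1 :: c2 :: rest) i).getD []) p.1).getD 0))
          (fun x => x)).getD 0)
      = List.zipWith min c0 (List.zipWith min c1 c2) := by
  apply List.ext_getElem
  · simp [PySem.List.length_enumerate]; omega
  · intro k hk hk'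
    have hk0 : k < c0.length := by
      simpa [PySem.List.length_enumerate] using hk
    have hk1 : k < c1.length := lt_of_lt_of_le hk0 h1
    have hk2 : k < c2.length := lt_of_lt_of_le hk0 h2
    have hrange : PySem.List.pyRange 0 3 1 = [(0 : Int), 1, 2] := by decide
    simp only [List.getElem_map, PySem.List.getElem_enumerate, hrange, List.map_cons,
      List.map_nil]
    have g0 : PySem.List.pyGet? (c0 :: c1 :: c2 :: rest) 0 = some c0 := by
      simp [PySem.List.pyGet?, PySem.List.pyIdx?]
      split_ifs with h
      · simp
      · exfalso; apply h; have := Int.natCast_nonneg rest.length; omega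
    have g1 : PySem.List.pyGet? (c0 :: c1 :: c2 :: rest) 1 = some c1 := by
      simp [PySem.List.pyGet?, PySem.List.pyIdx?]
      split_ifs with h
      · simp
      · exfalso; apply h; have := Int.natCast_nonneg rest.length; omega
    have g2 : PySem.List.pyGet? (c0 :: c1 :: c2 :: rest) 2 = some c2 := by
      simp [PySem.List.pyGet?, PySem.List.pyIdx?]
      split_ifs with h
      · simp
      · exfalso; apply h; have := Int.natCast_nonneg rest.length; omega
    rw [g0, g1, g2]
    simp only [Option.getD_some, zero_add]
    rw [PySem.List.pyGet?_natCast, PySem.List.pyGet?_natCast, PySem.List.pyGet?_natCast]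
    rw [List.getElem?_eq_getElem hk0, List.getElem?_eq_getElem hk1, List.getElem?_eq_getElem hk2]
    simp only [Option.getD_some]
    rw [min3_eval]
    simp [List.getElem_zipWith]

theorem boundB_eq (c0 c1 c2 : List Int) (rest : List (List Int))
    (h1 : c0.length ≤ c1.length) (h2 : c0.length ≤ c2.length) :
    (PySem.List.pyRange 0 (c0.length : Int) 1).map (fun j =>
        min ((PySem.List.pyGet? c0 j).getD 0)
          (min ((PySem.List.pyGet? ((PySem.List.pyGet? (c0 :: c1 :: c2 :: rest) 1).getD []) j).getD 0)
               ((PySem.List.pyGet? ((PySem.List.pyGet? (c0 :: c1 :: c2 :: rest) 2).getD []) j).getD 0))) =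
      List.zipWith min c0 (List.zipWith min c1 c2) := by
  have g1 : PySem.List.pyGet? (c0 :: c1 :: c2 :: rest) 1 = some c1 := by
    simp [PySem.List.pyGet?, PySem.List.pyIdx?]
    split_ifs with h
    · simp
    · exfalso; apply h; have := Int.natCast_nonneg rest.length; omega
  have g2 : PySem.List.pyGet? (c0 :: c1 :: c2 :: rest) 2 = some c2 := by
    simp [PySem.List.pyGet?, PySem.List.pyIdx?]
    split_ifs with h
    · simp
    · exfalso; apply h; have := Int.natCast_nonneg rest.length; omega
  rw [g1, g2]
  simp only [Option.getD_some]
  apply List.ext_getElem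
  · simp [PySem.List.length_pyRange_one]; omega
  · intro k hk hk'
    have hk0 : k < c0.length := by
      simpa [PySem.List.length_pyRange_one] using hk
    have hk1 : k < c1.length := lt_of_lt_of_le hk0 h1
    have hk2 : k < c2.length := lt_of_lt_of_le hk0 h2
    simp only [List.getElem_map, PySem.List.getElem_pyRange_one, zero_add]
    rw [PySem.List.pyGet?_natCast, PySem.List.pyGet?_natCast, PySem.List.pyGet?_natCast]
    rw [List.getElem?_eq_getElem hk0, List.getElem?_eq_getElem hk1, List.getElem?_eq_getElem hk2]
    simp [List.getElem_zipWith]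

-- A's foldl-with-set loop computes fillF
theorem fold_fill (bs pre : List Int) :
    (PySem.List.enumerate bs (pre.length : Int)).foldl
        (fun out p =>
          if out.sum < 1000000 then PySem.List.pySetD out p.1 (min (1000000 - out.sum) p.2)
          else out)
        (pre ++ List.replicate bs.length 0)
      = pre ++ fillF bs pre.sum := by
  induction bs generalizing pre with
  | nil => simp [PySem.List.enumerate_nil, fillF]
  | cons b t ih =>
    rw [PySem.List.enumerate_cons]
    simp only [List.foldl_cons, List.length_cons]
    have hsum : (pre ++ List.replicate (t.length + 1) 0).sum = pre.sum := by
      simp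
    rw [show List.replicate (t.length + 1) (0 : Int) = 0 :: List.replicate t.length 0 from rfl]
    by_cases hs : pre.sum < 1000000
    · rw [if_pos (by simpa [List.sum_append] using hs)]
      have hset : PySem.List.pySetD (pre ++ 0 :: List.replicate t.length 0) (pre.length : Int)
          (min (1000000 - (pre ++ 0 :: List.replicate t.length 0).sum) b)
          = pre ++ min (1000000 - pre.sum) b :: List.replicate t.length 0 := by
        rw [PySem.List.pySetD_natCast, set_append_cons]
        congr 2
        simp [List.sum_append]
      rw [hset]
      have hre : pre ++ min (1000000 - pre.sum) b :: List.replicate t.length 0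
          = (pre ++ [min (1000000 - pre.sum) b]) ++ List.replicate t.length 0 := by
        simp
      have hlen : ((pre.length : Int) + 1) = (((pre ++ [min (1000000 - pre.sum) b]).length : Int)) := by
        simp
      rw [hre, hlen, ih]
      simp [fillF, hs, List.sum_append]
    · rw [if_neg (by simpa [List.sum_append] using hs)]
      have hre : pre ++ 0 :: List.replicate t.length (0 : Int)
          = (pre ++ [0]) ++ List.replicate t.length 0 := by simp
      have hlen : ((pre.length : Int) + 1) = (((pre ++ [(0 : Int)]).length : Int)) := by simp
      rw [hre, hlen, ih]
      simp [fillF, hs, List.sum_append]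

-- remaining excess after trimming a nonnegative list
theorem trim_excess (t : List Int) (e : Int) (he : 0 ≤ e) (hn : ∀ x ∈ t, 0 ≤ x) :
    (trimBack t e).2 = max 0 (e - t.sum) := by
  induction t with
  | nil => simp [trimBack]; omega
  | cons x s ih =>
    have hx : 0 ≤ x := hn x (by simp)
    have ihs := ih (fun y hy => hn y (by simp [hy]))
    simp only [trimBack]
    split_ifs with h
    · rw [ihs] at h ⊢
      simp only [List.sum_cons]
      omega
    · rw [ihs] at h ⊢
      simp only [List.sum_cons]
      rw [min_def]
      split_ifs <;> omega

-- a nonnegative list with excess ≥ its sum is trimmed to all zeros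
theorem trim_all (t : List Int) (e : Int) (hn : ∀ x ∈ t, 0 ≤ x) (he : t.sum ≤ e) :
    (trimBack t e).1 = List.replicate t.length 0 := by
  induction t with
  | nil => simp [trimBack]
  | cons x s ih =>
    have hx : 0 ≤ x := hn x (by simp)
    have hs0 : 0 ≤ s.sum := List.sum_nonneg (fun y hy => hn y (by simp [hy]))
    have hns : ∀ y ∈ s, 0 ≤ y := fun y hy => hn y (by simp [hy])
    have he' : 0 ≤ e := le_trans (by simp at he; omega) le_rfl
    have hE := trim_excess s e he' hns
    simp only [trimBack]
    have hss : s.sum ≤ e := by simp at he; omega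
    split_ifs with h
    · rw [hE] at h
      have hx0 : x = 0 := by simp at he; omega
      simp [List.replicate_succ, hx0, ih hns hss]
    · rw [hE] at h ⊢
      have : min x (max 0 (e - s.sum)) = x := by
        rw [min_def]; split_ifs <;> simp at he ⊢ <;> omega
      simp [List.replicate_succ, this, ih hns hss]

theorem fill_ge (bs : List Int) (s : Int) (h : 1000000 ≤ s) :
    fillF bs s = List.replicate bs.length 0 := by
  induction bs with
  | nil => simp [fillF]
  | cons b t ih => simp [fillF, not_lt.mpr h, List.replicate_succ, ih]

-- front-fill equals back-trim on nonnegative bounds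
theorem fill_eq_trim (bs : List Int) (s : Int) (hn : ∀ b ∈ bs, 0 ≤ b)
    (hs0 : 0 ≤ s) (hsL : s ≤ 1000000) (hfeas : 1000000 ≤ s + bs.sum) :
    fillF bs s = (trimBack bs (s + bs.sum - 1000000)).1 := by
  induction bs generalizing s with
  | nil => simp [fillF, trimBack]
  | cons b t ih =>
    have hb : 0 ≤ b := hn b (by simp)
    have hnt : ∀ y ∈ t, 0 ≤ y := fun y hy => hn y (by simp [hy])
    have hts : 0 ≤ t.sum := List.sum_nonneg hnt
    have hesum : (b :: t).sum = b + t.sum := by simp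
    set e : Int := s + (b :: t).sum - 1000000 with hedef
    have he0 : 0 ≤ e := by omega
    have hE := trim_excess t e he0 hnt
    by_cases hs : s < 1000000
    · simp only [fillF, if_pos hs, trimBack]
      by_cases hble : b ≤ 1000000 - s
      · have hmin : min (1000000 - s) b = b := min_eq_right hble
        have hp2 : (trimBack t e).2 ≤ 0 := by rw [hE]; simp [hesum] at hedef ⊢; omega
        rw [if_pos hp2, hmin]
        congr 1
        have : e = (s + b) + t.sum - 1000000 := by simp [hesum] at hedef ⊢; omega
        rw [this] at *
        exact ih (s + b) hnt (by omega) (by omega) (by omega)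
      · have hmin : min (1000000 - s) b = 1000000 - s := min_eq_left (by omega)
        have hp2v : (trimBack t e).2 = s + b - 1000000 := by
          rw [hE]; simp [hesum] at hedef ⊢; omega
        have hp2 : ¬ (trimBack t e).2 ≤ 0 := by omega
        rw [if_neg hp2, hmin, hp2v]
        have hminb : min b (s + b - 1000000) = s + b - 1000000 := min_eq_right (by omega)
        rw [hminb]
        have htail : (trimBack t e).1 = List.replicate t.length 0 :=
          trim_all t e hnt (by simp [hesum] at hedef ⊢; omega)
        rw [htail, fill_ge t (s + (1000000 - s)) (by omega)]
        congr 1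
        omega
    · have hsL' : s = 1000000 := by omega
      simp only [fillF, if_neg hs, trimBack]
      have hse : t.sum ≤ e := by simp [hesum] at hedef ⊢; omega
      have htail := trim_all t e hnt hse
      rw [hE] at *
      by_cases hb0 : 0 < b
      · have hp2 : ¬ max 0 (e - t.sum) ≤ 0 := by simp [hesum] at hedef ⊢; omega
        rw [if_neg hp2]
        have : b - min b (max 0 (e - t.sum)) = 0 := by
          rw [min_def]; split_ifs <;> simp [hesum] at hedef ⊢ <;> omega
        rw [this, htail, fill_ge t s (by omega)]
      · have hb0' : b = 0 := by omega
        have hp2 : max 0 (e - t.sum) ≤ 0 := by simp [hesum] at hedef ⊢; omega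
        rw [if_pos hp2, hb0', htail, fill_ge t s (by omega)]

-- ===== VERDICT (by name: the statement is the Claim_ definition above) =====
theorem solve_spec : Claim_equal_solve := by
  intro C _hdom hpre
  unfold Spec_solve
  match C with
  | [] => exact absurd hpre.1 (by simp)
  | [c0] => exact absurd hpre.1 (by simp)
  | [c0, c1] => exact absurd hpre.1 (by simp)
  | c0 :: c1 :: c2 :: rest =>
    obtain ⟨-, h1, h2, hok⟩ := hpre
    simp only [List.getD, List.getElem?_cons_zero, List.getElem?_cons_succ,
      Option.getD_some] at h1 h2 hok
    have hbound := bound_eq c0 c1 c2 rest h1 h2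
    set B : List Int := List.zipWith min c0 (List.zipWith min c1 c2) with hB
    have hzm : (PySem.List.pyRange 0 (c0.length : Int) 1).map (fun j =>
        min ((PySem.List.pyGet? c0 j).getD 0)
          (min ((PySem.List.pyGet? ((PySem.List.pyGet? (c0 :: c1 :: c2 :: rest) 1).getD []) j).getD 0)
               ((PySem.List.pyGet? ((PySem.List.pyGet? (c0 :: c1 :: c2 :: rest) 2).getD []) j).getD 0))) = B :=
      boundB_eq c0 c1 c2 rest h1 h2
    unfold solve solve_alt
    simp only []
    rw [show (PySem.List.pyGet? (c0 :: c1 :: c2 :: rest) 0).getD [] = c0 by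
      simp [PySem.List.pyGet?, PySem.List.pyIdx?]
      split_ifs with h
      · simp
      · exfalso; apply h; have := Int.natCast_nonneg rest.length; omega]
    rw [hbound, hzm]
    by_cases himp : B.sum < 1000000
    · rw [if_pos himp, if_pos himp]
    · rw [if_neg himp, if_neg himp]
      have hnn : ∀ b ∈ B, 0 ≤ b := by
        rcases hok with h | h
        · exact absurd h himp
        · exact h
      have hfold := fold_fill B []
      simp only [List.length_nil, List.nil_append, Int.natCast_zero, List.sum_nil] at hfold
      rw [hfold]
      have := fill_eq_trim B 0 hnn le_rfl (by norm_num) (by omega)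
      rw [this]
      norm_num
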